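-- pv_equiv track=rewrite | github.com/Ahmed-5/competitive-programming | 1839-longest-substring-of-all-vowels-in-order/1839-longest-substring-of-all-vowels-in-order.py | longestBeautifulSubstring
-- ===== SOURCE A (Python) =====
-- def longestBeautifulSubstring(word: str) -> int:
--     max_len = 0
--     l = 0
--     current = -1
--     vowels = {'a':0, 'e':1, "i":2, 'o':3, "u":4}
--
--     for i in word:
--         v = vowels[i]
--         if v==current or v==1+current:
--             current = v
--             l += 1
--         else:
--             if v==0:
--                 l=1
--                 current = 0
--             else:
--                 l=0
--                 current=-1
--
--         if current == 4:
--             max_len = max(l, max_len)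
--
--     return max_len
-- ===== SOURCE B (Python) =====
-- def longestBeautifulSubstring(word: str) -> int:
--     vowels = {'a': 0, 'e': 1, 'i': 2, 'o': 3, 'u': 4}
--     # run-length encode the word into (vowel index, run length) groups
--     groups = []
--     for ch in word:
--         v = vowels[ch]
--         if groups and groups[-1][0] == v:
--             groups[-1] = (v, groups[-1][1] + 1)
--         else:
--             groups.append((v, 1))
--     # a beautiful substring is exactly 5 consecutive groups with indices 0,1,2,3,4
--     best = 0
--     for j in range(len(groups) - 4):
--         if (groups[j][0], groups[j + 1][0], groups[j + 2][0],
--                 groups[j + 3][0], groups[j + 4][0]) == (0, 1, 2, 3, 4):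
--             best = max(best, groups[j][1] + groups[j + 1][1] + groups[j + 2][1]
--                        + groups[j + 3][1] + groups[j + 4][1])
--     return best
-- ===== Notes on version B (the rewrite author's own statement) =====
-- stated objective: alternative
-- what changed: Replaces A's single-pass streak automaton (current level / streak length / reset logic) by run-length encoding the word into (vowel index, run length) groups and scanning every window of 5 consecutive groups for indices (0,1,2,3,4), summing their run lengths.
import Mathlib
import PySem

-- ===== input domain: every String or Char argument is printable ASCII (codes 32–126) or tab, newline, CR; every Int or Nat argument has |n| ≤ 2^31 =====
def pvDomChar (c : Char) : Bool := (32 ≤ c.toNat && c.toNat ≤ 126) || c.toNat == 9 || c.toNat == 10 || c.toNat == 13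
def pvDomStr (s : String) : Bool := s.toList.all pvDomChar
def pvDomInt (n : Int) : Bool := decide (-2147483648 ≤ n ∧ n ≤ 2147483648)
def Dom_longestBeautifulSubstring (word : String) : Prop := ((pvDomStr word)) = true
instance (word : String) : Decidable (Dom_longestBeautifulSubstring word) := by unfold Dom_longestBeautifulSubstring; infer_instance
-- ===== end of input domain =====

-- B replaces A's streak automaton by run-length encoding + a 5-group window scan (alternative
-- decomposition, same asymptotic cost); equal on all vowel-only words, on which A returns at all.

-- ===== PORT A =====
-- the dict lookup vowels[i]; on a non-vowel Python raises KeyError (excluded by Pre_), -100 is a dead value there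
def vowelIdxA (c : Char) : Int :=
  if c = 'a' then 0 else if c = 'e' then 1 else if c = 'i' then 2
  else if c = 'o' then 3 else if c = 'u' then 4 else -100

-- one iteration of A's for-loop; state = (max_len, l, current)
def stepA (st : Int × Int × Int) (c : Char) : Int × Int × Int :=
  let v := vowelIdxA c
  let lc : Int × Int :=
    if v = st.2.2 ∨ v = 1 + st.2.2 then (st.2.1 + 1, v)
    else if v = 0 then (1, 0) else (0, -1)
  (if lc.2 = 4 then max lc.1 st.1 else st.1, lc.1, lc.2)

def longestBeautifulSubstring (word : String) : Int :=
  (word.toList.foldl stepA (0, 0, -1)).1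

-- ===== PORT B =====
def vowelIdxB (c : Char) : Int :=
  if c = 'a' then 0 else if c = 'e' then 1 else if c = 'i' then 2
  else if c = 'o' then 3 else if c = 'u' then 4 else -100

-- one iteration of Source B's grouping loop; groups kept head-first (head = the group the loop last appended/updated)
def rleStep (gs : List (Int × Int)) (v : Int) : List (Int × Int) :=
  match gs with
  | (w, n) :: rest => if w = v then (w, n + 1) :: rest else (v, 1) :: (w, n) :: rest
  | [] => [(v, 1)]

-- Source B's window loop over j: each recursion step is the window starting at the current head
def scanB : List (Int × Int) → Int
  | (a, la) :: (b, lb) :: (c, lc) :: (d, ld) :: (e, le) :: rest =>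
    let best := scanB ((b, lb) :: (c, lc) :: (d, ld) :: (e, le) :: rest)
    if a = 0 ∧ b = 1 ∧ c = 2 ∧ d = 3 ∧ e = 4 then max best (la + lb + lc + ld + le) else best
  | _ => 0

def longestBeautifulSubstring_alt (word : String) : Int :=
  scanB (((word.toList.map vowelIdxB).foldl rleStep []).reverse)

-- ===== PRECONDITION & SPEC =====
-- Pre_: every character is a vowel; on any other character A's dict lookup raises KeyError (and so does B's).
def Pre_longestBeautifulSubstring (word : String) : Prop :=
  (word.toList.all fun c => c == 'a' || c == 'e' || c == 'i' || c == 'o' || c == 'u') = true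
instance (word : String) : Decidable (Pre_longestBeautifulSubstring word) := by
  unfold Pre_longestBeautifulSubstring; infer_instance

def pvWitness_longestBeautifulSubstring : String := "aaeiouu"

def Spec_longestBeautifulSubstring (word : String) (out : Int) : Prop := out = longestBeautifulSubstring_alt word
instance (word : String) (out : Int) : Decidable (Spec_longestBeautifulSubstring word out) := by unfold Spec_longestBeautifulSubstring; infer_instance

-- ===== CLAIM (what is proved, stated in full; the proofs are below) =====
def Claim_equal_longestBeautifulSubstring : Prop := ∀ (word : String), Dom_longestBeautifulSubstring word → Pre_longestBeautifulSubstring word → Spec_longestBeautifulSubstring word (longestBeautifulSubstring word)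

-- ===== LEMMAS AND PROOFS =====

-- A's loop body on the vowel index itself
def stepI (st : Int × Int × Int) (v : Int) : Int × Int × Int :=
  let lc : Int × Int :=
    if v = st.2.2 ∨ v = 1 + st.2.2 then (st.2.1 + 1, v)
    else if v = 0 then (1, 0) else (0, -1)
  (if lc.2 = 4 then max lc.1 st.1 else st.1, lc.1, lc.2)

-- A's answer on a suffix, entering with streak state (cur, l), with the running max factored out
def Hrun : Int → Int → List Int → Int
  | _, _, [] => 0
  | cur, l, v :: xs =>
    let lc : Int × Int :=
      if v = cur ∨ v = 1 + cur then (l + 1, v)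
      else if v = 0 then (1, 0) else (0, -1)
    max (if lc.2 = 4 then lc.1 else 0) (Hrun lc.2 lc.1 xs)

-- run-length encoding by recursion on the list (head-first groups, reference version)
def rleR : List Int → List (Int × Int)
  | [] => []
  | v :: xs =>
    match rleR xs with
    | (w, n) :: gs => if w = v then (v, n + 1) :: gs else (v, 1) :: (w, n) :: gs
    | [] => [(v, 1)]

def expand : List (Int × Int) → List Int
  | [] => []
  | (v, n) :: gs => List.replicate n.toNat v ++ expand gs

-- wellformed group list: indices in [0,4], run lengths ≥ 1, adjacent indices distinct
def WF (gs : List (Int × Int)) : Prop :=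
  (∀ p ∈ gs, 0 ≤ p.1 ∧ p.1 ≤ 4 ∧ 1 ≤ p.2) ∧ gs.IsChain (fun p q => p.1 ≠ q.1)

-- greedy chain of groups continuing a streak at level cur: (total length, final level)
def chainG : Int → List (Int × Int) → Int × Int
  | cur, [] => (0, cur)
  | cur, (v, n) :: gs =>
    if v = cur ∨ v = 1 + cur then ((chainG v gs).1 + n, (chainG v gs).2) else (0, cur)

-- value of the straddling beautiful substring: entering streak (cur, l) completed inside gs
def SG (cur l : Int) (gs : List (Int × Int)) : Int :=
  if (chainG cur gs).2 = 4 ∧ 1 ≤ (chainG cur gs).1 then l + (chainG cur gs).1 else 0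

-- contribution of the window at the head
def W0 : (Int × Int) → List (Int × Int) → Int
  | (a, la), (b, lb) :: (c, lc) :: (d, ld) :: (e, le) :: _ =>
    if a = 0 ∧ b = 1 ∧ c = 2 ∧ d = 3 ∧ e = 4 then la + lb + lc + ld + le else 0
  | _, _ => 0

-- climb with fuel k: sum of run lengths of groups with levels cur+1, cur+2, …, cur+k, if present
def climbN : Nat → Int → List (Int × Int) → Option Int
  | 0, _, _ => some 0
  | k + 1, cur, (w, m) :: t => if w = cur + 1 then (climbN k w t).map (m + ·) else none
  | _ + 1, _, [] => none

lemma Hrun_nonneg (xs : List Int) : ∀ (cur l : Int), 0 ≤ Hrun cur l xs := by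
  induction xs with
  | nil => intro cur l; simp [Hrun]
  | cons v xs ih => intro cur l; exact le_max_of_le_right (ih _ _)

lemma scanB_nonneg : ∀ (gs : List (Int × Int)), 0 ≤ scanB gs := by
  intro gs
  induction gs with
  | nil => simp [scanB]
  | cons g gs ih =>
    rcases g with ⟨a, la⟩
    rcases gs with _ | ⟨⟨b, lb⟩, _ | ⟨⟨c, lc⟩, _ | ⟨⟨d, ld⟩, _ | ⟨⟨e, le⟩, rest⟩⟩⟩⟩ <;>
      simp only [scanB] <;> try norm_num
    split
    · exact le_trans ih (le_max_left _ _)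
    · exact ih

lemma scan_cons (g : Int × Int) (gs : List (Int × Int)) :
    scanB (g :: gs) = max (W0 g gs) (scanB gs) := by
  rcases g with ⟨a, la⟩
  rcases gs with _ | ⟨⟨b, lb⟩, _ | ⟨⟨c, lc⟩, _ | ⟨⟨d, ld⟩, _ | ⟨⟨e, le⟩, rest⟩⟩⟩⟩ <;>
    simp only [scanB, W0] <;> try norm_num
  have h := scanB_nonneg ((b, lb) :: (c, lc) :: (d, ld) :: (e, le) :: rest)
  split <;> simp [Int.max_def] <;> omega

-- foldl of A's loop = running max + Hrun
lemma foldl_stepI (xs : List Int) : ∀ (s : Int × Int × Int), 0 ≤ s.1 →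
    (xs.foldl stepI s).1 = max s.1 (Hrun s.2.2 s.2.1 xs) := by
  induction xs with
  | nil => intro s hs; simp [Hrun]; omega
  | cons v xs ih =>
    intro s hs
    obtain ⟨m, l, cur⟩ := s
    simp only at hs
    simp only [List.foldl_cons, Hrun]
    by_cases hc : v = cur ∨ v = 1 + cur
    · have hstep : stepI (m, l, cur) v = (if v = 4 then max (l + 1) m else m, l + 1, v) := by
        simp only [stepI, if_pos hc]
      have hnn : (0 : Int) ≤ (if v = 4 then max (l + 1) m else m) := by
        split_ifs
        · exact le_trans hs (le_max_right _ _)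
        · exact hs
      rw [hstep, ih _ hnn]
      rw [if_pos hc]
      simp only
      by_cases h4 : v = 4 <;> simp only [h4, if_true, if_false]
      · simp only [Int.max_def]; split_ifs <;> omega
      · rw [max_eq_right (Hrun_nonneg xs v (l + 1))]
    · by_cases h0 : v = 0
      · subst h0
        have hstep : stepI (m, l, cur) 0 = (m, 1, 0) := by
          simp [stepI, hc]
        rw [hstep, ih _ hs, if_neg hc]
        norm_num
        rw [max_eq_right (Hrun_nonneg xs 0 1)]
      · have hstep : stepI (m, l, cur) v = (m, 0, -1) := by
          simp [stepI, hc, h0]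
        rw [hstep, ih _ hs, if_neg hc, if_neg h0]
        norm_num
        rw [max_eq_right (Hrun_nonneg xs (-1) 0)]

lemma rleR_foldl (xs : List Int) : ∀ (w m : Int) (acc : List (Int × Int)),
    xs.foldl rleStep ((w, m) :: acc) =
      (match rleR xs with
       | [] => (w, m) :: acc
       | (v, n) :: gs =>
         if v = w then gs.reverse ++ (w, m + n) :: acc
         else (rleR xs).reverse ++ (w, m) :: acc) := by
  induction xs with
  | nil => intro w m acc; simp [rleR]
  | cons v xs ih =>
    intro w m acc
    simp only [List.foldl_cons, rleStep]
    by_cases hwv : w = v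
    · rw [if_pos hwv, ih]
      rcases h : rleR xs with _ | ⟨⟨v', n⟩, gs⟩
      · simp [rleR, h, hwv]
      · by_cases hv' : v' = v
        · simp only [rleR, h, hv', hwv, if_true, eq_self_iff_true]
          rw [show m + 1 + n = m + (n + 1) from by ring]
        · simp only [rleR, h, if_neg hv']
          simp [List.reverse_cons, List.append_assoc, hv', hwv]
    · rw [if_neg hwv, ih]
      have hvw : ¬ v = w := fun hh => hwv hh.symm
      rcases h : rleR xs with _ | ⟨⟨v', n⟩, gs⟩
      · simp [rleR, h, hvw]
      · by_cases hv' : v' = v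
        · simp only [rleR, h, hv', hvw, if_true, eq_self_iff_true, if_false]
          rw [show (1 : Int) + n = n + 1 from by ring]
          simp [List.reverse_cons, List.append_assoc]
        · simp only [rleR, h, if_neg hv']
          simp [hvw, hv', List.reverse_cons, List.append_assoc]

lemma rle_eq_rleR (xs : List Int) : (xs.foldl rleStep []).reverse = rleR xs := by
  cases xs with
  | nil => rfl
  | cons v xs =>
    simp only [List.foldl_cons, rleStep]
    rw [rleR_foldl]
    rcases h : rleR xs with _ | ⟨⟨v', n⟩, gs⟩
    · simp [rleR, h]
    · by_cases hv' : v' = v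
      · subst hv'
        simp only [rleR, h, if_pos rfl]
        have hmn : (1 : Int) + n = n + 1 := by ring
        simp [hmn]
      · simp only [rleR, h, if_neg hv']
        simp [hv']

lemma expand_rleR : ∀ (xs : List Int), (∀ v ∈ xs, 0 ≤ v ∧ v ≤ 4) →
    WF (rleR xs) ∧ expand (rleR xs) = xs := by
  intro xs
  induction xs with
  | nil => intro _; exact ⟨⟨by simp [rleR], by simp [rleR]⟩, rfl⟩
  | cons v xs ih =>
    intro hx
    obtain ⟨hv, hxs⟩ : (0 ≤ v ∧ v ≤ 4) ∧ ∀ u ∈ xs, 0 ≤ u ∧ u ≤ 4 := by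
      refine ⟨hx v (by simp), fun u hu => hx u (by simp [hu])⟩
    obtain ⟨⟨ihM, ihC⟩, ihE⟩ := ih hxs
    rcases h : rleR xs with _ | ⟨⟨w, n⟩, gs⟩
    · rw [h] at ihE
      simp only [expand] at ihE
      subst ihE
      refine ⟨⟨?_, ?_⟩, ?_⟩ <;> simp [rleR, WF, expand, hv.1, hv.2]
    · rw [h] at ihM ihC ihE
      have hn1 : 1 ≤ n := (ihM (w, n) (by simp)).2.2
      by_cases hwv : w = v
      · subst hwv
        have hrl : rleR (w :: xs) = (w, n + 1) :: gs := by simp [rleR, h]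
        refine ⟨⟨?_, ?_⟩, ?_⟩
        · rw [hrl]
          intro p hp
          rcases List.mem_cons.mp hp with hp | hp
          · obtain ⟨hw1, hw2, _⟩ := ihM (w, n) (by simp)
            refine ⟨by simp [hp, hw1], by simp [hp, hw2], by simp [hp]; omega⟩
          · exact ihM p (by simp [hp])
        · rw [hrl]
          cases gs with
          | nil => exact List.IsChain.singleton _
          | cons q t =>
            rw [List.isChain_cons_cons] at ihC ⊢
            exact ⟨ihC.1, ihC.2⟩
        · rw [hrl]
          simp only [expand] at ihE ⊢
          have ht : (n + 1).toNat = n.toNat + 1 := by omega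
          rw [ht, List.replicate_succ]
          simp only [List.cons_append, ihE]
      · have hrl : rleR (v :: xs) = (v, 1) :: (w, n) :: gs := by simp [rleR, h, hwv]
        refine ⟨⟨?_, ?_⟩, ?_⟩
        · rw [hrl]
          intro p hp
          rcases List.mem_cons.mp hp with hp | hp
          · simp [hp, hv.1, hv.2]
          · exact ihM p hp
        · rw [hrl]
          rw [List.isChain_cons_cons]
          exact ⟨fun hh => hwv hh.symm, ihC⟩
        · rw [hrl]
          have hthis := ihE
          simp only [expand] at hthis
          simp [expand, hthis]

lemma run_ext (v : Int) (n : Nat) (rest : List Int) : ∀ (cur l : Int), (v = cur ∨ v = 1 + cur) →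
    Hrun cur l (List.replicate (n + 1) v ++ rest) =
      max (if v = 4 then l + (n + 1 : Int) else 0) (Hrun v (l + (n + 1 : Int)) rest) := by
  induction n with
  | zero =>
    intro cur l hc
    simp only [List.replicate_succ, List.replicate_zero, List.nil_append, List.cons_append,
      Hrun, if_pos hc]
    norm_num
  | succ n ihn =>
    intro cur l hc
    rw [List.replicate_succ, List.cons_append]
    simp only [Hrun, if_pos hc]
    rw [ihn v (l + 1) (Or.inl rfl)]
    have e : l + 1 + ((n : Int) + 1) = l + (((n + 1 : Nat) : Int) + 1) := by push_cast; ring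
    by_cases h4 : v = 4 <;> simp only [h4, if_true, if_false]
    · rw [e, max_eq_right]
      exact le_trans (by omega : l + 1 ≤ l + (((n + 1 : Nat) : Int) + 1)) (le_max_left _ _)
    · rw [e, ← max_assoc, max_self]

lemma run_a (cur l : Int) (h : ¬(0 = cur ∨ 0 = 1 + cur)) (n : Nat) (rest : List Int) :
    Hrun cur l (List.replicate (n + 1) 0 ++ rest) = Hrun 0 (n + 1 : Int) rest := by
  rw [List.replicate_succ, List.cons_append]
  simp only [Hrun, if_neg h]
  norm_num
  cases n with
  | zero =>
    simp only [List.replicate_zero, List.nil_append]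
    norm_num
    exact Hrun_nonneg rest 0 1
  | succ n =>
    rw [run_ext 0 n (rest := rest) 0 1 (Or.inl rfl)]
    norm_num
    rw [show (1 : Int) + ((n : Int) + 1) = (n : Int) + 1 + 1 from by ring]
    exact max_eq_right (Hrun_nonneg rest 0 _)

lemma run_dead (v : Int) (hv : 1 ≤ v) (n : Nat) (rest : List Int) :
    ∀ (cur l : Int), ¬(v = cur ∨ v = 1 + cur) →
    Hrun cur l (List.replicate (n + 1) v ++ rest) = Hrun (-1) 0 rest := by
  induction n with
  | zero =>
    intro cur l h
    rw [List.replicate_succ, List.replicate_zero, List.cons_append, List.nil_append]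
    simp only [Hrun, if_neg h, if_neg (by omega : ¬ v = 0)]
    norm_num
    exact Hrun_nonneg rest (-1) 0
  | succ n ihn =>
    intro cur l h
    rw [List.replicate_succ, List.cons_append]
    simp only [Hrun, if_neg h, if_neg (by omega : ¬ v = 0)]
    norm_num
    rw [ihn (-1) 0 (by omega)]
    norm_num
    exact Hrun_nonneg rest (-1) 0

lemma chainG_at4 (t : List (Int × Int)) (h : ∀ p ∈ t.take 1, p.1 ≠ 4 ∧ p.1 ≤ 4) :
    chainG 4 t = (0, 4) := by
  cases t with
  | nil => rfl
  | cons q t =>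
    obtain ⟨h1, h2⟩ := h q (by simp)
    rcases q with ⟨w, m⟩
    simp only at h1 h2
    simp only [chainG, if_neg (by omega : ¬ (w = 4 ∨ w = 1 + 4))]

lemma WF_tail (g : Int × Int) (t : List (Int × Int)) (h : WF (g :: t)) : WF t := by
  refine ⟨fun p hp => h.1 p (by simp [hp]), ?_⟩
  cases t with
  | nil => exact List.IsChain.nil
  | cons q t => exact (List.isChain_cons_cons.mp h.2).2

lemma WF_head_ne (g : Int × Int) (t : List (Int × Int)) (h : WF (g :: t)) :
    ∀ p ∈ t.take 1, p.1 ≠ g.1 := by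
  cases t with
  | nil => simp
  | cons q t =>
    intro p hp
    simp only [List.take_succ_cons, List.take_zero, List.mem_singleton] at hp
    subst hp
    exact fun hh => (List.isChain_cons_cons.mp h.2).1 hh.symm

-- chainG characterised by climbN under wellformedness
lemma chainG_climbN : ∀ (k : Nat) (cur : Int) (gs : List (Int × Int)), cur + k = 4 → 1 ≤ k →
    WF gs → (∀ p ∈ gs.take 1, p.1 ≠ cur) →
    (match climbN k cur gs with
     | some s => chainG cur gs = (s, 4) ∧ 1 ≤ s
     | none => (chainG cur gs).2 ≠ 4) := by
  intro k
  induction k with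
  | zero => intro cur gs _ h1; omega
  | succ k ih =>
    intro cur gs hsum hk hWF hne
    cases gs with
    | nil =>
      simp only [climbN, chainG]
      push_cast at hsum
      omega
    | cons g t =>
      rcases g with ⟨w, m⟩
      obtain ⟨hw0, hw4, hm1⟩ := hWF.1 (w, m) (by simp)
      by_cases hw : w = cur + 1
      · have hext : w = cur ∨ w = 1 + cur := Or.inr (by omega)
        have htWF : WF t := WF_tail _ _ hWF
        have htne : ∀ p ∈ t.take 1, p.1 ≠ w := WF_head_ne (w, m) t hWF
        by_cases hk0 : k = 0
        · subst hk0
          have hc4 : chainG w t = (0, 4) := by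
            have hw4' : w = 4 := by push_cast at hsum; omega
            subst hw4'
            refine chainG_at4 t ?_
            intro p hp
            exact ⟨htne p hp, (hWF.1 p (by cases t with
              | nil => simp at hp
              | cons q t' => simp at hp; simp [hp])).2.1⟩
          simp only [climbN, if_pos hw, Option.map_some, chainG, if_pos hext, hc4]
          have hw4' : w = 4 := by push_cast at hsum; omega
          exact ⟨by simp [hw4'], by omega⟩
        · have hthis := ih w t (by push_cast at hsum ⊢; omega) (by omega) htWF htne
          cases hcl : climbN k w t with
          | some s =>
            rw [hcl] at hthis
            simp only [climbN, if_pos hw, hcl, Option.map_some]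
            simp only [chainG, if_pos hext, hthis.1]
            exact ⟨by simp [add_comm], by omega⟩
          | none =>
            rw [hcl] at hthis
            simp only [climbN, if_pos hw, hcl, Option.map_none]
            simp only [chainG, if_pos hext]
            simpa using hthis
      · have hnc : w ≠ cur := hne (w, m) (by simp)
        have hnx : ¬ (w = cur ∨ w = 1 + cur) := by push Not; exact ⟨hnc, by omega⟩
        simp only [climbN, if_neg hw, chainG, if_neg hnx]
        push_cast at hsum
        simp
        omega

lemma W0_climbN (v n : Int) (gs : List (Int × Int)) :
    W0 (v, n) gs = if v = 0 then (match climbN 4 0 gs with | some s => n + s | none => 0) else 0 := by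
  rcases gs with _ | ⟨⟨b, lb⟩, _ | ⟨⟨c, lc⟩, _ | ⟨⟨d, ld⟩, _ | ⟨⟨e, le⟩, rest⟩⟩⟩⟩ <;>
    simp only [W0, climbN] <;> split_ifs <;> simp_all <;> ring

lemma start_le (gs : List (Int × Int)) (h : WF gs) : SG (-1) 0 gs ≤ scanB gs := by
  have hthis := chainG_climbN 5 (-1) gs (by norm_num) (by norm_num) h
    (fun p hp => by have := (h.1 p (List.mem_of_mem_take hp)).1; omega)
  cases hcl : climbN 5 (-1) gs with
  | none =>
    rw [hcl] at hthis
    simp only at hthis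
    unfold SG
    rw [if_neg (fun hh => hthis hh.1)]
    exact scanB_nonneg gs
  | some s =>
    rw [hcl] at hthis
    obtain ⟨hch, hs1⟩ := hthis
    have hSG : SG (-1) 0 gs = s := by
      unfold SG; rw [hch]; rw [if_pos ⟨rfl, hs1⟩]; ring
    rw [hSG]
    cases gs with
    | nil => simp [climbN] at hcl
    | cons g t =>
      rcases g with ⟨w, m⟩
      simp only [climbN] at hcl
      by_cases hw : w = -1 + 1
      · rw [if_pos hw] at hcl
        cases hcl2 : climbN 4 w t with
        | none => rw [hcl2] at hcl; simp at hcl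
        | some s' =>
          rw [hcl2] at hcl
          simp only [Option.map_some, Option.some_inj] at hcl
          have hw0 : w = 0 := by omega
          subst hw0
          rw [scan_cons]
          have hW : W0 (0, m) t = m + s' := by
            rw [W0_climbN, if_pos rfl, hcl2]
          rw [hW]
          exact le_trans (by omega) (le_max_left _ _)
      · rw [if_neg hw] at hcl; simp at hcl

lemma main' : ∀ (gs : List (Int × Int)), WF gs → ∀ (cur l : Int), 0 ≤ l →
    Hrun cur l (expand gs) = max (SG cur l gs) (scanB gs) := by
  intro gs
  induction gs with
  | nil =>
    intro _ cur l _
    simp [expand, Hrun, SG, chainG, scanB]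
  | cons g gs ih =>
    intro hWF cur l hl
    rcases g with ⟨v, n⟩
    obtain ⟨hv0, hv4, hn1⟩ := hWF.1 (v, n) (by simp)
    have htWF : WF gs := WF_tail _ _ hWF
    have hne : ∀ p ∈ gs.take 1, p.1 ≠ v := WF_head_ne (v, n) gs hWF
    obtain ⟨k, hk⟩ : ∃ k : Nat, n.toNat = k + 1 := ⟨n.toNat - 1, by omega⟩
    have hkn : ((k : Int) + 1) = n := by omega
    rw [show expand ((v, n) :: gs) = List.replicate (k + 1) v ++ expand gs from by
      simp [expand, hk]]
    rw [scan_cons]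
    by_cases hext : v = cur ∨ v = 1 + cur
    · rw [run_ext v k (expand gs) cur l hext, hkn]
      rw [ih htWF v (l + n) (by omega)]
      by_cases h4 : v = 4
      · subst h4
        have hc40 : chainG 4 gs = (0, 4) := chainG_at4 gs
          (fun p hp => ⟨hne p hp, (htWF.1 p (List.mem_of_mem_take hp)).2.1⟩)
        have hch : chainG cur ((4, n) :: gs) = (0 + n, 4) := by
          simp [chainG, if_pos hext, hc40]
        have hSG1 : SG cur l ((4, n) :: gs) = l + n := by
          unfold SG; rw [hch]; rw [if_pos ⟨rfl, by omega⟩]; ring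
        have hSG2 : SG 4 (l + n) gs = 0 := by
          unfold SG; rw [hc40]; simp
        have hW : W0 (4, n) gs = 0 := by rw [W0_climbN]; norm_num
        rw [hSG1, hSG2, hW]
        have hS := scanB_nonneg gs
        norm_num
      · have hk4 : v + (((4 - v).toNat : Nat) : Int) = 4 := by omega
        have hthis := chainG_climbN (4 - v).toNat v gs hk4 (by omega) htWF hne
        cases hcl : climbN (4 - v).toNat v gs with
        | some s =>
          rw [hcl] at hthis
          obtain ⟨hch, hs1⟩ := hthis
          have hSG1 : SG cur l ((v, n) :: gs) = l + (s + n) := by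
            have hc : chainG cur ((v, n) :: gs) = (s + n, 4) := by
              simp [chainG, if_pos hext, hch]
            unfold SG; rw [hc]; rw [if_pos ⟨rfl, by omega⟩]
          have hSG2 : SG v (l + n) gs = l + n + s := by
            unfold SG; rw [hch]; rw [if_pos ⟨rfl, hs1⟩]
          have hW : W0 (v, n) gs ≤ s + n := by
            rw [W0_climbN]
            by_cases hv0' : v = 0
            · subst hv0'
              rw [if_pos rfl]
              rw [show ((4 : Int) - 0).toNat = 4 from by decide] at hcl
              rw [hcl]
              exact le_of_eq (by omega : n + s = s + n)
            · rw [if_neg hv0']; omega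
          rw [hSG1, hSG2, if_neg h4]
          have hS := scanB_nonneg gs
          simp only [Int.max_def]; split_ifs <;> omega
        | none =>
          rw [hcl] at hthis
          simp only at hthis
          have hSG1 : SG cur l ((v, n) :: gs) = 0 := by
            have hc2 : (chainG cur ((v, n) :: gs)).2 = (chainG v gs).2 := by
              simp [chainG, if_pos hext]
            unfold SG; rw [if_neg (fun hh => hthis (hc2 ▸ hh.1))]
          have hSG2 : SG v (l + n) gs = 0 := by
            unfold SG; rw [if_neg (fun hh => hthis hh.1)]
          have hW : W0 (v, n) gs = 0 := by
            rw [W0_climbN]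
            by_cases hv0' : v = 0
            · subst hv0'
              rw [if_pos rfl]
              rw [show ((4 : Int) - 0).toNat = 4 from by decide] at hcl
              rw [hcl]
            · rw [if_neg hv0']
          rw [hSG1, hSG2, hW, if_neg h4]
    · by_cases hv0' : v = 0
      · subst hv0'
        rw [run_a cur l hext k (expand gs), hkn]
        rw [ih htWF 0 n (by omega)]
        have hthis := chainG_climbN 4 0 gs (by norm_num) (by norm_num) htWF hne
        have hch0 : chainG cur (((0 : Int), n) :: gs) = (0, cur) := by
          simp [chainG, if_neg hext]
        have hSG1 : SG cur l (((0 : Int), n) :: gs) = 0 := by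
          unfold SG; rw [hch0]; simp
        have hEq : SG 0 n gs = W0 (0, n) gs := by
          rw [W0_climbN, if_pos rfl]
          cases hcl : climbN 4 0 gs with
          | some s =>
            rw [hcl] at hthis
            obtain ⟨hch, hs1⟩ := hthis
            unfold SG; rw [hch]; rw [if_pos ⟨rfl, hs1⟩]
          | none =>
            rw [hcl] at hthis
            simp only at hthis
            unfold SG; rw [if_neg (fun hh => hthis hh.1)]
        have hS := scanB_nonneg gs
        rw [hSG1, hEq, max_eq_right (le_max_of_le_right hS)]
      · have hv1 : 1 ≤ v := by omega
        rw [run_dead v hv1 k (expand gs) cur l hext]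
        rw [ih htWF (-1) 0 le_rfl]
        have hch : chainG cur ((v, n) :: gs) = (0, cur) := by
          simp [chainG, if_neg hext]
        have hSG1 : SG cur l ((v, n) :: gs) = 0 := by
          unfold SG; rw [hch]; simp
        have hW : W0 (v, n) gs = 0 := by rw [W0_climbN, if_neg hv0']
        have hst := start_le gs htWF
        have hS := scanB_nonneg gs
        rw [hSG1, hW]
        simp only [Int.max_def]; split_ifs <;> omega

-- ===== VERDICT (by name: the statement is the Claim_ definition above) =====
theorem longestBeautifulSubstring_spec : Claim_equal_longestBeautifulSubstring := by
  intro word _ hPre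
  unfold Spec_longestBeautifulSubstring longestBeautifulSubstring longestBeautifulSubstring_alt
  have hBA : vowelIdxB = vowelIdxA := rfl
  rw [hBA, rle_eq_rleR]
  have hstep : word.toList.foldl stepA (0, 0, -1) =
      (word.toList.map vowelIdxA).foldl stepI (0, 0, -1) := by
    rw [List.foldl_map]
    rfl
  have hxv : ∀ v ∈ word.toList.map vowelIdxA, 0 ≤ v ∧ v ≤ 4 := by
    intro v hv
    obtain ⟨c, hc, hcv⟩ := List.mem_map.mp hv
    have h5 := List.all_eq_true.mp hPre c hc
    simp only [Bool.or_eq_true, beq_iff_eq] at h5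
    rcases h5 with (((h | h) | h) | h) | h <;> subst h <;> rw [← hcv] <;> decide
  obtain ⟨hWF, hE⟩ := expand_rleR (word.toList.map vowelIdxA) hxv
  have hA : ((word.toList.map vowelIdxA).foldl stepI (0, 0, -1)).1 =
      Hrun (-1) 0 (word.toList.map vowelIdxA) := by
    rw [foldl_stepI (word.toList.map vowelIdxA) (0, 0, -1) (by norm_num)]
    exact max_eq_right (Hrun_nonneg _ (-1) 0)
  have hmain := main' (rleR (word.toList.map vowelIdxA)) hWF (-1) 0 le_rfl
  rw [hE] at hmain
  rw [hstep, hA, hmain]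
  exact max_eq_right (start_le _ hWF)
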